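-- pv_equiv track=rewrite | github.com/kreimben/Coding-Test | algoexpert.io/Subarray Sort.py | subarraySort
-- ===== SOURCE A (Python) =====
-- def subarraySort(array):
--     s = sorted(array)
--     if s == array:
--         return [-1, -1]
--     # I will use binary search. From starting index to ending index.
--     # During binary search, left side of left index could be decreasing.
--     # the right side of right index could be increasing.
--     left, right = 0, len(array) - 1
--     while left < right:
--         moved = False
--         if s[left] == array[left]:
--             left += 1
--             moved = True
--         if s[right] == array[right]:
--             right -= 1
--             moved = True
--
--         if not moved:
--             break
--
--     return [left, right]
-- ===== SOURCE B (Python) =====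
-- def subarraySort(array):
--     # A forward pass with a running max finds the last out-of-place index;
--     # a mirror pass with a running min finds the first.
--     mx = None
--     right = -1
--     for i, x in enumerate(array):
--         if mx is not None and x < mx:
--             right = i
--         else:
--             mx = x
--     if right == -1:
--         return [-1, -1]
--     mn = None
--     left = -1
--     for j, x in reversed(list(enumerate(array))):
--         if mn is not None and x > mn:
--             left = j
--         else:
--             mn = x
--     return [left, right]
-- ===== Notes on version B (the rewrite author's own statement) =====
-- stated objective: alternative
-- what changed: B drops A's sort entirely: a forward pass with a running maximum finds the last out-of-place index and a backward pass with a running minimum finds the first, replacing sorting plus two-pointer shrinking with two linear scans.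
import Mathlib
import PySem

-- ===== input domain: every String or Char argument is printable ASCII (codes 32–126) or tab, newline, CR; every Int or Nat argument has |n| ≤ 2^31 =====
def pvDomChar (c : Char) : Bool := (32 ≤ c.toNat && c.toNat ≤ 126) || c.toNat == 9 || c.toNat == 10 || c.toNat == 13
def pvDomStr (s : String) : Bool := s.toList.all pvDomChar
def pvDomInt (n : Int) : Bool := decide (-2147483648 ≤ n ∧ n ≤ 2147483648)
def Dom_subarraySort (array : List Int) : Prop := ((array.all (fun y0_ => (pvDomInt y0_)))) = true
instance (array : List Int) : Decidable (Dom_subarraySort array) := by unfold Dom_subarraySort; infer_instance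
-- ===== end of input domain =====

-- B drops A's sort + two-pointer shrink: a forward running-max scan and a backward
-- running-min scan locate the same boundaries; proved equal to A on every input.

-- ===== PORT A =====
-- A's while loop: shrink [left, right] while the ends already match sorted(array).
def pvLoopA (s a : List Int) (left right : Int) : Int × Int :=
  if _h : left < right then
    if PySem.List.pyGet? s left = PySem.List.pyGet? a left then
      if PySem.List.pyGet? s right = PySem.List.pyGet? a right then
        pvLoopA s a (left + 1) (right - 1)
      else
        pvLoopA s a (left + 1) right
    else
      if PySem.List.pyGet? s right = PySem.List.pyGet? a right then
        pvLoopA s a left (right - 1)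
      else
        (left, right)
  else (left, right)
termination_by (right - left).toNat
decreasing_by all_goals omega

def subarraySort (array : List Int) : List Int :=
  let s := PySem.List.sorted array (fun x => x) false
  if s = array then [-1, -1]
  else
    let p := pvLoopA s array 0 ((array.length : Int) - 1)
    [p.1, p.2]

-- ===== PORT B =====
-- forward pass: state = (running max, last index seen below the running max)
def pvStep1 (st : Option Int × Int) (p : Int × Int) : Option Int × Int :=
  match st.1 with
  | some m => if p.2 < m then (some m, p.1) else (some p.2, st.2)
  | none => (some p.2, st.2)

-- backward pass: state = (running min, last index seen above the running min)
def pvStep2 (st : Option Int × Int) (p : Int × Int) : Option Int × Int :=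
  match st.1 with
  | some m => if p.2 > m then (some m, p.1) else (some p.2, st.2)
  | none => (some p.2, st.2)

def subarraySort_alt (array : List Int) : List Int :=
  let r := ((PySem.List.enumerate array).foldl pvStep1 (none, -1)).2
  if r = -1 then [-1, -1]
  else
    let l := ((PySem.List.enumerate array).reverse.foldl pvStep2 (none, -1)).2
    [l, r]

-- ===== PRECONDITION & SPEC =====
def Spec_subarraySort (array : List Int) (out : List Int) : Prop := out = subarraySort_alt array
instance (array : List Int) (out : List Int) : Decidable (Spec_subarraySort array out) := by unfold Spec_subarraySort; infer_instance

-- ===== CLAIM (what is proved, stated in full; the proofs are below) =====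
def Claim_equal_subarraySort : Prop := ∀ (array : List Int), Dom_subarraySort array → Spec_subarraySort array (subarraySort array)

-- ===== LEMMAS AND PROOFS =====

-- running max of m over l
def pvMax (m : Int) (l : List Int) : Int := l.foldl max m
-- running min of l then m
def pvMin (l : List Int) (m : Int) : Int := l.foldr min m
-- index i of t is out of order w.r.t. the forward pass seeded with m
def pvBad1 (t : List Int) (m : Int) (i : Nat) : Prop := t.getD i 0 < pvMax m (t.take i)
-- index i of t is out of order w.r.t. the backward pass seeded with m
def pvBad2 (t : List Int) (m : Int) (i : Nat) : Prop := pvMin (t.drop (i + 1)) m < t.getD i 0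

theorem pvMax_le_iff (l : List Int) (m c : Int) : pvMax m l ≤ c ↔ m ≤ c ∧ ∀ x ∈ l, x ≤ c := by
  induction l generalizing m with
  | nil => simp [pvMax]
  | cons y t ih =>
    simp only [pvMax, List.foldl_cons, List.mem_cons]
    rw [show List.foldl max (max m y) t = pvMax (max m y) t from rfl, ih]
    constructor
    · rintro ⟨h1, h2⟩
      exact ⟨le_trans (le_max_left _ _) h1, fun x hx => hx.elim (fun e => e ▸ le_trans (le_max_right _ _) h1) (h2 x)⟩
    · rintro ⟨h1, h2⟩
      exact ⟨max_le h1 (h2 y (Or.inl rfl)), fun x hx => h2 x (Or.inr hx)⟩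

theorem lt_pvMax_iff (l : List Int) (m x : Int) : x < pvMax m l ↔ m > x ∨ ∃ y ∈ l, y > x := by
  rw [← not_le, pvMax_le_iff, not_and_or]
  simp [not_le, not_forall, gt_iff_lt]

theorem le_pvMin_iff (l : List Int) (m c : Int) : c ≤ pvMin l m ↔ c ≤ m ∧ ∀ x ∈ l, c ≤ x := by
  induction l with
  | nil => simp [pvMin]
  | cons y t ih =>
    simp only [pvMin, List.foldr_cons, List.mem_cons]
    rw [show List.foldr min m t = pvMin t m from rfl, le_min_iff, ih]
    constructor
    · rintro ⟨h1, h2, h3⟩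
      exact ⟨h2, fun x hx => hx.elim (fun e => e ▸ h1) (h3 x)⟩
    · rintro ⟨h1, h2⟩
      exact ⟨h2 y (Or.inl rfl), h1, fun x hx => h2 x (Or.inr hx)⟩

theorem pvMin_lt_iff (l : List Int) (m x : Int) : pvMin l m < x ↔ m < x ∨ ∃ y ∈ l, y < x := by
  rw [← not_le, le_pvMin_iff, not_and_or]
  simp [not_le, not_forall]

theorem pvGetD_append_left (ys zs : List Int) (i : Nat) (h : i < ys.length) :
    (ys ++ zs).getD i 0 = ys.getD i 0 := by
  rw [List.getD_eq_getElem _ 0 (by simp; omega), List.getD_eq_getElem _ 0 h]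
  exact List.getElem_append_left h

theorem pvGetD_concat_last (ys : List Int) (x : Int) : (ys ++ [x]).getD ys.length 0 = x := by
  rw [List.getD_eq_getElem _ 0 (by simp)]
  simp

theorem pvBad1_cons_zero (x m : Int) (t : List Int) : pvBad1 (x :: t) m 0 ↔ x < m := by
  simp [pvBad1, pvMax]

theorem pvBad1_cons_succ (x m : Int) (t : List Int) (i : Nat) :
    pvBad1 (x :: t) m (i + 1) ↔ pvBad1 t (max m x) i := by
  simp only [pvBad1, pvMax, List.take_succ_cons, List.foldl_cons, List.getD_cons_succ]

theorem pvBad2_concat (ys : List Int) (x m : Int) (i : Nat) (hi : i < ys.length) :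
    pvBad2 (ys ++ [x]) m i ↔ pvBad2 ys (min x m) i := by
  unfold pvBad2 pvMin
  rw [pvGetD_append_left ys [x] i hi, List.drop_append_of_le_length (by omega), List.foldr_append]
  simp only [List.foldr_cons, List.foldr_nil]

theorem pvBad2_concat_top (ys : List Int) (x m : Int) :
    pvBad2 (ys ++ [x]) m ys.length ↔ m < x := by
  unfold pvBad2 pvMin
  rw [pvGetD_concat_last, List.drop_eq_nil_of_le (by simp)]
  simp

-- ===== forward pass characterisation =====

theorem pvFold1_nobad (t : List Int) : ∀ (k : Int) (mx r : Int),
    (∀ i < t.length, ¬ pvBad1 t mx i) →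
    ((PySem.List.enumerate t k).foldl pvStep1 (some mx, r)).2 = r := by
  induction t with
  | nil => intro k mx r _; simp [PySem.List.enumerate]
  | cons x t ih =>
    intro k mx r h
    have h0 : ¬ x < mx := fun hx => h 0 (by simp) ((pvBad1_cons_zero x mx t).2 hx)
    have hxm : max mx x = x := max_eq_right (le_of_not_gt h0)
    have ht : ∀ i < t.length, ¬ pvBad1 t x i := by
      intro i hi hb
      exact h (i + 1) (by simpa using Nat.succ_lt_succ hi)
        ((pvBad1_cons_succ x mx t i).2 (by rwa [hxm]))
    rw [PySem.List.enumerate_cons]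
    simp only [List.foldl_cons, pvStep1, if_neg h0]
    exact ih (k + 1) x r ht

theorem pvFold1_bad (t : List Int) : ∀ (k : Int) (mx r : Int) (G : Nat),
    G < t.length → pvBad1 t mx G → (∀ i, G < i → i < t.length → ¬ pvBad1 t mx i) →
    ((PySem.List.enumerate t k).foldl pvStep1 (some mx, r)).2 = k + G := by
  induction t with
  | nil => intro _ _ _ G hG; simp at hG
  | cons x t ih =>
    intro k mx r G hG hbad hmax
    rw [PySem.List.enumerate_cons]
    simp only [List.foldl_cons, pvStep1]
    cases G with
    | zero =>
      have h0 : x < mx := (pvBad1_cons_zero x mx t).1 hbad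
      rw [if_pos h0]
      have hxm : max mx x = mx := max_eq_left (le_of_lt h0)
      have ht : ∀ i < t.length, ¬ pvBad1 t mx i := by
        intro i hi hb
        exact hmax (i + 1) (Nat.succ_pos i) (by simpa using Nat.succ_lt_succ hi)
          ((pvBad1_cons_succ x mx t i).2 (by rwa [hxm]))
      rw [pvFold1_nobad t (k + 1) mx k ht]; simp
    | succ G' =>
      have hb' : pvBad1 (x :: t) mx (G' + 1) := hbad
      rw [pvBad1_cons_succ] at hb'
      have hm' : ∀ i, G' < i → i < t.length → ¬ pvBad1 t (max mx x) i := by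
        intro i h1 h2 hb
        exact hmax (i + 1) (Nat.succ_lt_succ h1) (by simpa using Nat.succ_lt_succ h2)
          ((pvBad1_cons_succ x mx t i).2 hb)
      by_cases h0 : x < mx
      · rw [if_pos h0]
        have hxm : max mx x = mx := max_eq_left (le_of_lt h0)
        rw [hxm] at hb' hm'
        rw [ih (k + 1) mx k G' (by simpa using hG) hb' hm']
        push_cast; ring
      · rw [if_neg h0]
        have hxm : max mx x = x := max_eq_right (le_of_not_gt h0)
        rw [hxm] at hb' hm'
        rw [ih (k + 1) x r G' (by simpa using hG) hb' hm']
        push_cast; ring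

-- ===== backward pass characterisation =====

theorem pvEnumRev_concat (ys : List Int) (x : Int) :
    (PySem.List.enumerate (ys ++ [x])).reverse
      = ((ys.length : Int), x) :: (PySem.List.enumerate ys).reverse := by
  rw [show PySem.List.enumerate (ys ++ [x]) = PySem.List.enumerate (ys ++ [x]) 0 from rfl,
    PySem.List.enumerate_append]
  simp [PySem.List.enumerate_cons, PySem.List.enumerate_nil]

theorem pvFold2_nobad (ys : List Int) : ∀ (m lf : Int),
    (∀ i < ys.length, ¬ pvBad2 ys m i) →
    (((PySem.List.enumerate ys).reverse).foldl pvStep2 (some m, lf)).2 = lf := by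
  induction ys using List.reverseRecOn with
  | nil => intro m lf _; simp [PySem.List.enumerate_nil]
  | append_singleton ys x ih =>
    intro m lf h
    have htop : ¬ x > m := fun hx => h ys.length (by simp) ((pvBad2_concat_top ys x m).2 hx)
    have hxm : min x m = x := min_eq_left (le_of_not_gt htop)
    have hys : ∀ i < ys.length, ¬ pvBad2 ys x i := by
      intro i hi hb
      exact h i (by simp; omega) ((pvBad2_concat ys x m i hi).2 (by rwa [hxm]))
    rw [pvEnumRev_concat]
    simp only [List.foldl_cons, pvStep2, if_neg htop]
    exact ih x lf hys

theorem pvFold2_bad (ys : List Int) : ∀ (m lf : Int) (L : Nat),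
    L < ys.length → pvBad2 ys m L → (∀ i < L, ¬ pvBad2 ys m i) →
    (((PySem.List.enumerate ys).reverse).foldl pvStep2 (some m, lf)).2 = (L : Int) := by
  induction ys using List.reverseRecOn with
  | nil => intro _ _ L hL; simp at hL
  | append_singleton ys x ih =>
    intro m lf L hL hbad hmin
    rw [pvEnumRev_concat]
    simp only [List.foldl_cons, pvStep2]
    rcases Nat.lt_or_ge L ys.length with hcase | hcase
    · have hbad' : pvBad2 ys (min x m) L := (pvBad2_concat ys x m L hcase).1 hbad
      have hmin' : ∀ i < L, ¬ pvBad2 ys (min x m) i := by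
        intro i hi hb
        exact hmin i hi ((pvBad2_concat ys x m i (by omega)).2 hb)
      by_cases htop : x > m
      · rw [if_pos htop]
        have hxm : min x m = m := min_eq_right (le_of_lt htop)
        rw [hxm] at hbad' hmin'
        exact ih m (ys.length : Int) L hcase hbad' hmin'
      · rw [if_neg htop]
        have hxm : min x m = x := min_eq_left (le_of_not_gt htop)
        rw [hxm] at hbad' hmin'
        exact ih x lf L hcase hbad' hmin'
    · have hLeq : L = ys.length := by simp at hL; omega
      subst hLeq
      have htop : x > m := (pvBad2_concat_top ys x m).1 hbad
      rw [if_pos htop]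
      have hxm : min x m = m := min_eq_right (le_of_lt htop)
      have hys : ∀ i < ys.length, ¬ pvBad2 ys m i := by
        intro i hi hb
        exact hmin i hi ((pvBad2_concat ys x m i hi).2 (by rwa [hxm]))
      exact pvFold2_nobad ys m (ys.length : Int) hys

-- ===== sorted-mismatch boundary lemmas =====

theorem pvDropEq (a s : List Int) (i : Nat) (hlen : s.length = a.length)
    (h : ∀ k, i ≤ k → a.getD k 0 = s.getD k 0) : a.drop i = s.drop i := by
  apply List.ext_getElem (by simp [hlen])
  intro j h1 h2
  have hin : i + j < a.length := by simp at h1; omega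
  have hin2 : i + j < s.length := by omega
  rw [List.getElem_drop, List.getElem_drop]
  have := h (i + j) (by omega)
  rw [List.getD_eq_getElem a 0 hin, List.getD_eq_getElem s 0 hin2] at this
  exact this

theorem pvPrefixPerm (a s : List Int) (i : Nat) (hp : s.Perm a) (hlen : s.length = a.length)
    (h : ∀ k, i ≤ k → a.getD k 0 = s.getD k 0) : (a.take i).Perm (s.take i) := by
  have hd := pvDropEq a s i hlen h
  have h2 : (a.take i ++ a.drop i).Perm (s.take i ++ s.drop i) := by
    simpa using hp.symm
  rw [hd] at h2
  exact (List.perm_append_right_iff _).1 h2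

-- after the last mismatch R : a[R] < s[R], some earlier element exceeds a[R], and no index above R is out of order
theorem pvLastMismatch (a s : List Int) (R : Nat) (hp : s.Perm a) (hlen : s.length = a.length)
    (hsort : s.Pairwise (· ≤ ·)) (hR : R < a.length)
    (hmis : a.getD R 0 ≠ s.getD R 0) (hmax : ∀ k, R < k → a.getD k 0 = s.getD k 0) :
    a.getD R 0 < s.getD R 0 ∧ (∃ j, j < R ∧ a.getD R 0 < a.getD j 0) ∧
      (∀ i, R < i → i < a.length → ∀ j, j < i → a.getD j 0 ≤ a.getD i 0) := by
  have hperm := pvPrefixPerm a s (R + 1) hp hlen (fun k hk => hmax k (by omega))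
  have hsle : ∀ p q, p ≤ q → q < s.length → s.getD p 0 ≤ s.getD q 0 := by
    intro p q hpq hq
    rcases Nat.eq_or_lt_of_le hpq with rfl | hlt
    · exact le_refl _
    · rw [List.getD_eq_getElem s 0 (by omega), List.getD_eq_getElem s 0 hq]
      exact List.pairwise_iff_getElem.1 hsort p q (by omega) hq hlt
  -- every element of a.take (R+1) is ≤ s.getD R 0
  have hble : ∀ j, j ≤ R → a.getD j 0 ≤ s.getD R 0 := by
    intro j hj
    have hmem : a.getD j 0 ∈ a.take (R + 1) := by
      rw [List.getD_eq_getElem a 0 (by omega)]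
      have : a[j] = (a.take (R + 1))[j]'(by simp; omega) := (List.getElem_take).symm
      rw [this]; exact List.getElem_mem _
    have hmem2 : a.getD j 0 ∈ s.take (R + 1) := hperm.subset hmem
    obtain ⟨idx, hidx, heq⟩ := List.getElem_of_mem hmem2
    have hidx' : idx < R + 1 := by simp at hidx; omega
    have : (s.take (R + 1))[idx]'hidx = s[idx]'(by simp [hlen]; omega) := List.getElem_take
    rw [this] at heq
    calc a.getD j 0 = s.getD idx 0 := by rw [← heq, List.getD_eq_getElem s 0 (by simp [hlen]; omega)]
    _ ≤ s.getD R 0 := hsle idx R (by omega) (by omega)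
  have haR : a.getD R 0 < s.getD R 0 := lt_of_le_of_ne (hble R le_rfl) hmis
  refine ⟨haR, ?_, ?_⟩
  · -- s.getD R 0 occurs among a.take (R+1)
    have hmem : s.getD R 0 ∈ s.take (R + 1) := by
      rw [List.getD_eq_getElem s 0 (by omega)]
      have : s[R]'(by omega) = (s.take (R + 1))[R]'(by simp [hlen]; omega) := (List.getElem_take).symm
      rw [this]; exact List.getElem_mem _
    have hmem2 : s.getD R 0 ∈ a.take (R + 1) := hperm.symm.subset hmem
    obtain ⟨idx, hidx, heq⟩ := List.getElem_of_mem hmem2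
    have hidx' : idx < R + 1 := by simp at hidx; omega
    have heq2 : a.getD idx 0 = s.getD R 0 := by
      rw [List.getD_eq_getElem a 0 (by omega), ← heq, List.getElem_take]
    have hne : idx ≠ R := by
      intro e; rw [e] at heq2; exact hmis heq2
    exact ⟨idx, by omega, by rw [heq2]; exact haR⟩
  · intro i hi hin j hj
    rcases Nat.lt_or_ge R j with hjR | hjR
    · rw [hmax j hjR, hmax i hi]
      exact hsle j i (by omega) (by omega)
    · calc a.getD j 0 ≤ s.getD R 0 := hble j hjR
      _ ≤ s.getD i 0 := hsle R i (by omega) (by omega)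
      _ = a.getD i 0 := (hmax i hi).symm

-- before the first mismatch L : a[L] > s[L], some later element is below a[L], and no index below L is out of order
theorem pvFirstMismatch (a s : List Int) (L : Nat) (hp : s.Perm a) (hlen : s.length = a.length)
    (hsort : s.Pairwise (· ≤ ·)) (hL : L < a.length)
    (hmis : a.getD L 0 ≠ s.getD L 0) (hmin : ∀ k, k < L → a.getD k 0 = s.getD k 0) :
    s.getD L 0 < a.getD L 0 ∧ (∃ j, L < j ∧ j < a.length ∧ a.getD j 0 < a.getD L 0) ∧
      (∀ i, i < L → ∀ j, i < j → j < a.length → a.getD i 0 ≤ a.getD j 0) := by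
  have htake : a.take L = s.take L := by
    apply List.ext_getElem (by simp [hlen])
    intro j h1 h2
    have hj : j < L := by simp at h1; omega
    have hjn : j < a.length := by simp at h1; omega
    rw [List.getElem_take, List.getElem_take]
    have := hmin j hj
    rw [List.getD_eq_getElem a 0 hjn, List.getD_eq_getElem s 0 (by omega)] at this
    exact this
  have hperm : (a.drop L).Perm (s.drop L) := by
    have h2 : (a.take L ++ a.drop L).Perm (s.take L ++ s.drop L) := by simpa using hp.symm
    rw [htake] at h2
    exact (List.perm_append_left_iff _).1 h2
  have hsle : ∀ p q, p ≤ q → q < s.length → s.getD p 0 ≤ s.getD q 0 := by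
    intro p q hpq hq
    rcases Nat.eq_or_lt_of_le hpq with rfl | hlt
    · exact le_refl _
    · rw [List.getD_eq_getElem s 0 (by omega), List.getD_eq_getElem s 0 hq]
      exact List.pairwise_iff_getElem.1 hsort p q (by omega) hq hlt
  -- every element of a.drop L is ≥ s.getD L 0
  have hbge : ∀ j, L ≤ j → j < a.length → s.getD L 0 ≤ a.getD j 0 := by
    intro j hj hjn
    have hmem : a.getD j 0 ∈ a.drop L := by
      rw [List.getD_eq_getElem a 0 hjn]
      have : a[j] = (a.drop L)[j - L]'(by simp; omega) := by
        rw [List.getElem_drop]; congr 1; omega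
      rw [this]; exact List.getElem_mem _
    have hmem2 : a.getD j 0 ∈ s.drop L := hperm.subset hmem
    obtain ⟨idx, hidx, heq⟩ := List.getElem_of_mem hmem2
    have hidx' : L + idx < s.length := by simp at hidx; omega
    rw [List.getElem_drop] at heq
    calc s.getD L 0 ≤ s.getD (L + idx) 0 := hsle L (L + idx) (by omega) (by omega)
    _ = a.getD j 0 := by rw [List.getD_eq_getElem s 0 hidx', heq]
  have haL : s.getD L 0 < a.getD L 0 := lt_of_le_of_ne (hbge L le_rfl hL) (Ne.symm hmis)
  refine ⟨haL, ?_, ?_⟩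
  · have hmem : s.getD L 0 ∈ s.drop L := by
      rw [List.getD_eq_getElem s 0 (by omega)]
      have h0 : 0 < (s.drop L).length := by simp [hlen]; omega
      have hm := List.getElem_mem h0
      rw [List.getElem_drop] at hm
      simpa using hm
    have hmem2 : s.getD L 0 ∈ a.drop L := hperm.symm.subset hmem
    obtain ⟨idx, hidx, heq⟩ := List.getElem_of_mem hmem2
    have hidx' : L + idx < a.length := by simp at hidx; omega
    rw [List.getElem_drop] at heq
    have heq2 : a.getD (L + idx) 0 = s.getD L 0 := by
      rw [List.getD_eq_getElem a 0 hidx', heq]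
    have hne : L + idx ≠ L := by
      intro e
      rw [e] at heq2; exact hmis heq2
    exact ⟨L + idx, by omega, hidx', by rw [heq2]; exact haL⟩
  · intro i hi j hij hjn
    rcases Nat.lt_or_ge j L with hjL | hjL
    · rw [hmin i (by omega), hmin j hjL]
      exact hsle i j (by omega) (by omega)
    · calc a.getD i 0 = s.getD i 0 := hmin i hi
      _ ≤ s.getD L 0 := hsle i L (by omega) (by omega)
      _ ≤ a.getD j 0 := hbge j hjL hjn

-- ===== A's loop reaches exactly (L, R) =====

theorem pvLoopA_run (s a : List Int) (L R : Nat) (hlen : s.length = a.length) (hLR : L < R)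
    (hRn : R < a.length)
    (hL : a.getD L 0 ≠ s.getD L 0) (hLmin : ∀ k, k < L → a.getD k 0 = s.getD k 0)
    (hR : a.getD R 0 ≠ s.getD R 0) (hRmax : ∀ k, R < k → a.getD k 0 = s.getD k 0) :
    ∀ (fuel : Nat) (l r : Int), (r - l).toNat ≤ fuel →
      0 ≤ l → l ≤ (L : Int) → (R : Int) ≤ r → r ≤ (a.length : Int) - 1 →
      pvLoopA s a l r = ((L : Int), (R : Int)) := by
  intro fuel
  induction fuel with
  | zero => intro l r hf h0 hl hr hrn; omega
  | succ f ih =>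
    intro l r hf h0 hl hr hrn
    have hlr : l < r := by omega
    have hsl : PySem.List.pyGet? s l = some (s.getD l.toNat 0) := by
      rw [PySem.List.pyGet?_eq_some_getElem s (i := l) h0 (by push_cast [hlen]; omega),
        List.getD_eq_getElem s 0 (by omega)]
    have hal : PySem.List.pyGet? a l = some (a.getD l.toNat 0) := by
      rw [PySem.List.pyGet?_eq_some_getElem a (i := l) h0 (by omega),
        List.getD_eq_getElem a 0 (by omega)]
    have hsr : PySem.List.pyGet? s r = some (s.getD r.toNat 0) := by
      rw [PySem.List.pyGet?_eq_some_getElem s (i := r) (by omega) (by push_cast [hlen]; omega),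
        List.getD_eq_getElem s 0 (by omega)]
    have har : PySem.List.pyGet? a r = some (a.getD r.toNat 0) := by
      rw [PySem.List.pyGet?_eq_some_getElem a (i := r) (by omega) (by omega),
        List.getD_eq_getElem a 0 (by omega)]
    have hcl : (PySem.List.pyGet? s l = PySem.List.pyGet? a l) ↔ l < (L : Int) := by
      rw [hsl, hal]
      constructor
      · intro h
        rcases Int.lt_or_le l (L : Int) with h' | h'
        · exact h'
        · exfalso
          have : l.toNat = L := by omega
          rw [this] at h
          exact hL (by simpa using h.symm)
      · intro h'
        rw [hLmin l.toNat (by omega)]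
    have hcr : (PySem.List.pyGet? s r = PySem.List.pyGet? a r) ↔ (R : Int) < r := by
      rw [hsr, har]
      constructor
      · intro h
        rcases Int.lt_or_le (R : Int) r with h' | h'
        · exact h'
        · exfalso
          have : r.toNat = R := by omega
          rw [this] at h
          exact hR (by simpa using h.symm)
      · intro h'
        rw [hRmax r.toNat (by omega)]
    rw [pvLoopA]
    rw [dif_pos hlr]
    by_cases c1 : PySem.List.pyGet? s l = PySem.List.pyGet? a l
    · have hlL : l < (L : Int) := hcl.1 c1
      rw [if_pos c1]
      by_cases c2 : PySem.List.pyGet? s r = PySem.List.pyGet? a r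
      · have hrR : (R : Int) < r := hcr.1 c2
        rw [if_pos c2]
        exact ih (l + 1) (r - 1) (by omega) (by omega) (by omega) (by omega) (by omega)
      · rw [if_neg c2]
        exact ih (l + 1) r (by omega) (by omega) (by omega) (by omega) (by omega)
    · have hlL : ¬ l < (L : Int) := fun h => c1 (hcl.2 h)
      have hlL' : l = (L : Int) := by omega
      rw [if_neg c1]
      by_cases c2 : PySem.List.pyGet? s r = PySem.List.pyGet? a r
      · have hrR : (R : Int) < r := hcr.1 c2
        rw [if_pos c2]
        exact ih l (r - 1) (by omega) (by omega) (by omega) (by omega) (by omega)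
      · have hrR : ¬ (R : Int) < r := fun h => c2 (hcr.2 h)
        rw [if_neg c2]
        exact Prod.ext (by simpa using hlL') (by simp; omega)

-- ===== bridges between pvBad1/pvBad2 and "some earlier bigger / later smaller element" =====

theorem pvBad1_bridge (x : Int) (t : List Int) (i : Nat) (hi : i < t.length) :
    pvBad1 t x i ↔ ∃ j, j < i + 1 ∧ t.getD i 0 < (x :: t).getD j 0 := by
  rw [pvBad1, lt_pvMax_iff]
  constructor
  · rintro (h | ⟨y, hy, h⟩)
    · exact ⟨0, by omega, h⟩
    · obtain ⟨idx, hidx, heq⟩ := List.getElem_of_mem hy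
      have hidx' : idx < i := by simp at hidx; omega
      have heq' : t.getD idx 0 = y := by
        rw [List.getElem_take] at heq
        rw [List.getD_eq_getElem t 0 (by omega)]
        exact heq
      refine ⟨idx + 1, by omega, ?_⟩
      rw [List.getD_cons_succ, heq']
      exact h
  · rintro ⟨j, hj, h⟩
    cases j with
    | zero => exact Or.inl h
    | succ j' =>
      right
      rw [List.getD_cons_succ] at h
      have hj' : j' < i := by omega
      refine ⟨t.getD j' 0, ?_, h⟩
      rw [List.getD_eq_getElem t 0 (by omega)]
      have hm := List.getElem_mem (by simp; omega : j' < (t.take i).length)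
      rw [List.getElem_take] at hm
      exact hm

theorem pvBad2_bridge (ys : List Int) (x : Int) (i : Nat) (hi : i < ys.length) :
    pvBad2 ys x i ↔ ∃ j, i < j ∧ j < ys.length + 1 ∧ (ys ++ [x]).getD j 0 < ys.getD i 0 := by
  rw [pvBad2, pvMin_lt_iff]
  constructor
  · rintro (h | ⟨y, hy, h⟩)
    · refine ⟨ys.length, by omega, by omega, ?_⟩
      rw [pvGetD_concat_last]
      exact h
    · obtain ⟨idx, hidx, heq⟩ := List.getElem_of_mem hy
      have hidx' : i + 1 + idx < ys.length := by simp at hidx; omega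
      rw [List.getElem_drop] at heq
      refine ⟨i + 1 + idx, by omega, by omega, ?_⟩
      rw [pvGetD_append_left ys [x] _ hidx', List.getD_eq_getElem ys 0 hidx', heq]
      exact h
  · rintro ⟨j, hj1, hj2, h⟩
    rcases Nat.lt_or_ge j ys.length with hjl | hjl
    · right
      rw [pvGetD_append_left ys [x] _ hjl] at h
      refine ⟨ys.getD j 0, ?_, h⟩
      rw [List.getD_eq_getElem ys 0 hjl]
      have hm := List.getElem_mem (by simp; omega : j - (i + 1) < (ys.drop (i + 1)).length)
      rw [List.getElem_drop] at hm
      have he : ys[i + 1 + (j - (i + 1))]'(by omega) = ys[j]'hjl := by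
        congr 1; omega
      rw [he] at hm
      exact hm
    · left
      have hje : j = ys.length := by omega
      rw [hje, pvGetD_concat_last] at h
      exact h

-- ===== main theorem =====

theorem pvPairwise_noBad1 (x : Int) (t : List Int) (hpa : (x :: t).Pairwise (· ≤ ·)) :
    ∀ i < t.length, ¬ pvBad1 t x i := by
  intro i hi hb
  obtain ⟨j, hj, hgt⟩ := (pvBad1_bridge x t i hi).1 hb
  have hle := List.pairwise_iff_getElem.1 hpa j (i + 1) (by simp; omega) (by simp; omega) (by omega)
  rw [← List.getD_eq_getElem (x :: t) 0 (by simp; omega),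
    ← List.getD_eq_getElem (x :: t) 0 (by simp; omega), List.getD_cons_succ] at hle
  omega

theorem pv_main (a : List Int) : subarraySort a = subarraySort_alt a := by
  simp only [subarraySort, subarraySort_alt]
  set s := PySem.List.sorted a (fun x => x) false with hs
  have hperm : s.Perm a := PySem.List.sorted_perm a _ false
  have hlen : s.length = a.length := hperm.length_eq
  have hsort : s.Pairwise (· ≤ ·) := by
    simpa using PySem.List.sorted_pairwise a (fun x => x)
  by_cases heq : s = a
  · rw [if_pos heq]
    have hfold0 : ((PySem.List.enumerate a).foldl pvStep1 (none, -1)).2 = -1 := by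
      have hpa : a.Pairwise (· ≤ ·) := heq ▸ hsort
      rcases a with _ | ⟨x, t⟩
      · simp [PySem.List.enumerate_nil]
      · rw [PySem.List.enumerate_cons]
        simp only [List.foldl_cons, pvStep1]
        exact pvFold1_nobad t (0 + 1) x (-1) (pvPairwise_noBad1 x t hpa)
    rw [hfold0, if_pos rfl]
  · rw [if_neg heq]
    -- the mismatch region [L, R]
    have hex : ∃ i : Nat, a.getD i 0 ≠ s.getD i 0 := by
      by_contra hc
      simp only [not_exists, not_not] at hc
      refine heq (List.ext_getElem (by omega) ?_)
      intro i h1 h2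
      have := hc i
      rwa [List.getD_eq_getElem a 0 h2, List.getD_eq_getElem s 0 h1, eq_comm] at this
    have hPbound : ∀ i : Nat, a.getD i 0 ≠ s.getD i 0 → i < a.length := by
      intro i hne
      by_contra hge
      rw [List.getD_eq_default _ _ (by omega), List.getD_eq_default _ _ (by omega)] at hne
      exact hne rfl
    set L := Nat.find hex with hLdef
    have hPL : a.getD L 0 ≠ s.getD L 0 := Nat.find_spec hex
    have hLmin : ∀ k, k < L → a.getD k 0 = s.getD k 0 := by
      intro k hk
      have := Nat.find_min hex hk
      exact not_not.1 this
    have hexc := hex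
    obtain ⟨i0, hi0⟩ := hexc
    set R := Nat.findGreatest (fun i => a.getD i 0 ≠ s.getD i 0) a.length with hRdef
    have hPR : a.getD R 0 ≠ s.getD R 0 :=
      Nat.findGreatest_spec (P := fun i => a.getD i 0 ≠ s.getD i 0)
        (le_of_lt (hPbound i0 hi0)) hi0
    have hRmax : ∀ k, R < k → a.getD k 0 = s.getD k 0 := by
      intro k hk
      by_contra hck
      exact Nat.findGreatest_is_greatest (P := fun i => a.getD i 0 ≠ s.getD i 0)
        hk (le_of_lt (hPbound k hck)) hck
    have hRn : R < a.length := hPbound R hPR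
    have hLn : L < a.length := hPbound L hPL
    have hLle : L ≤ R := Nat.find_min' hex hPR
    obtain ⟨haRlt, ⟨jR, hjR, hjRgt⟩, hnoAbove⟩ :=
      pvLastMismatch a s R hperm hlen hsort hRn hPR hRmax
    obtain ⟨haLgt, ⟨jL, hjL1, hjL2, hjLlt⟩, hnoBelow⟩ :=
      pvFirstMismatch a s L hperm hlen hsort hLn hPL hLmin
    have hLR : L < R := by
      rcases Nat.lt_or_ge L R with h | h
      · exact h
      · have : L = R := by omega
        rw [this] at haLgt
        omega
    -- A's loop lands on (L, R)
    have hrun : pvLoopA s a 0 ((a.length : Int) - 1) = ((L : Int), (R : Int)) :=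
      pvLoopA_run s a L R hlen hLR hRn hPL hLmin hPR (fun k hk => hRmax k hk)
        a.length 0 ((a.length : Int) - 1) (by omega) (by omega) (by omega) (by omega) (by omega)
    rw [hrun]
    -- B's forward pass lands on R
    have hR1 : 1 ≤ R := by omega
    have hfold1 : ((PySem.List.enumerate a).foldl pvStep1 (none, -1)).2 = (R : Int) := by
      rcases a with _ | ⟨x, t⟩
      · simp at hRn
      · rw [PySem.List.enumerate_cons]
        simp only [List.foldl_cons, pvStep1]
        have htlen : t.length + 1 = (x :: t).length := by simp
        have hbad : pvBad1 t x (R - 1) := by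
          refine (pvBad1_bridge x t (R - 1) (by simp at hRn; omega)).2 ⟨jR, by omega, ?_⟩
          have h1 : (x :: t).getD R 0 = t.getD (R - 1) 0 := by
            obtain ⟨R', hR'⟩ : ∃ R', R = R' + 1 := ⟨R - 1, by omega⟩
            rw [hR', List.getD_cons_succ]
            norm_num
          rw [← h1]
          exact hjRgt
        have hnb : ∀ i, R - 1 < i → i < t.length → ¬ pvBad1 t x i := by
          intro i h1 h2 hb
          obtain ⟨j, hj, hgt⟩ := (pvBad1_bridge x t i h2).1 hb
          have := hnoAbove (i + 1) (by omega) (by simp; omega) j (by omega)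
          rw [List.getD_cons_succ] at this
          omega
        rw [pvFold1_bad t (0 + 1) x (-1) (R - 1) (by simp at hRn; omega) hbad hnb]
        push_cast
        omega
    rw [hfold1, if_neg (by omega)]
    -- B's backward pass lands on L
    have hLlt : L < a.length - 1 := by omega
    rcases List.eq_nil_or_concat a with hnil | ⟨ys, z, hconc⟩
    · rw [hnil] at hRn; simp at hRn
    have hyslen : ys.length + 1 = a.length := by rw [hconc, List.concat_eq_append]; simp
    have hfold2 : (((PySem.List.enumerate a).reverse).foldl pvStep2 (none, -1)).2 = (L : Int) := by
      rw [hconc, List.concat_eq_append, pvEnumRev_concat]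
      simp only [List.foldl_cons, pvStep2]
      have hgds : ∀ j : Nat, (ys ++ [z]).getD j 0 = a.getD j 0 := by
        intro j; rw [hconc, List.concat_eq_append]
      have hbad : pvBad2 ys z L := by
        refine (pvBad2_bridge ys z L (by omega)).2 ⟨jL, hjL1, by omega, ?_⟩
        rw [hgds jL, ← pvGetD_append_left ys [z] L (by omega), hgds L]
        exact hjLlt
      have hnb : ∀ i, i < L → ¬ pvBad2 ys z i := by
        intro i hiL hb
        obtain ⟨j, hj1, hj2, hlt⟩ := (pvBad2_bridge ys z i (by omega)).1 hb
        have := hnoBelow i hiL j hj1 (by omega)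
        rw [hgds j, ← pvGetD_append_left ys [z] i (by omega), hgds i] at hlt
        omega
      exact pvFold2_bad ys z (-1) L (by omega) hbad hnb
    rw [hfold2]

-- ===== VERDICT (by name: the statement is the Claim_ definition above) =====
theorem subarraySort_spec : Claim_equal_subarraySort := by
  intro array _
  unfold Spec_subarraySort
  exact pv_main array
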